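-- pv_equiv track=rewrite | github.com/shhuan1989/algorithms | codeforces/1336C.py | solve
-- ===== SOURCE A (Python) =====
-- MOD = 998244353
--
-- def solve(s, t):
--     n, m = len(s), len(t)
--     dp = [[0 for _ in range(m+1)] for _ in range(n+1)]
--     dp[n][0] = 1
--
--     for i in range(n-1, 0, -1):
--         for j in range(m+1):
--             if j == 0:
--                 if i >= m:
--                     dp[i][0] = n - i + 1
--                 elif s[i] == t[i]:
--                     dp[i][0] = dp[i+1][0]
--             elif j == m:
--                 dp[i][m] = 2 * dp[i+1][m] % MOD
--                 if s[i] == t[m-1]: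
--                     dp[i][m] = (dp[i][m] + dp[i+1][m-1]) % MOD
--             else:
--                 if i + j >= m or s[i] == t[i+j]:
--                     dp[i][j] = dp[i+1][j]
--                 if s[i] == t[j-1]:
--                     dp[i][j] = (dp[i][j] + dp[i+1][j-1]) % MOD
--
--     ans = dp[1][m]
--     for i in range(m):
--         if t[i] == s[0]:
--             ans = (ans + dp[1][i]) % MOD
--     ans *= 2
--     ans %= MOD
--
--     return ans
-- ===== SOURCE B (Python) =====
-- MOD = 998244353
--
--
-- def _deps(s, t, n, m, i, j):
--     # columns of row i+1 that the cell (i, j) actually reads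
--     if j == 0:
--         return [0] if (i < m and s[i] == t[i]) else []
--     if j == m:
--         return [m, m - 1] if s[i] == t[m - 1] else [m]
--     out = [j] if (i + j >= m or s[i] == t[i + j]) else []
--     if s[i] == t[j - 1]:
--         out.append(j - 1)
--     return out
--
--
-- def _value(s, t, n, m, i, j, below):
--     # value of cell (i, j), reading the demanded cells of row i+1 from `below`
--     if i == n:
--         return 1 if j == 0 else 0
--     if j == 0:
--         return n - i + 1 if i >= m else (below[0] if s[i] == t[i] else 0)
--     if j == m:
--         v = 2 * below[m] % MOD
--         return (v + below[m - 1]) % MOD if s[i] == t[m - 1] else v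
--     v = below[j] if (i + j >= m or s[i] == t[i + j]) else 0
--     return (v + below[j - 1]) % MOD if s[i] == t[j - 1] else v
--
--
-- def solve(s, t):
--     # Top-down memoization made depth-safe: discover which cells the answer
--     # demands (dependency pass), then evaluate exactly those cells into
--     # per-row dicts; the full table of A is never materialised.
--     n, m = len(s), len(t)
--     top = [m] + [j for j in range(m) if t[j] == s[0]]  # cells of row 1 the answer reads
--     need = [set() for _ in range(n + 1)]
--     need[1] = set(top)
--     for i in range(1, n):
--         nxt = set()
--         for j in need[i]:
--             nxt.update(_deps(s, t, n, m, i, j))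
--         need[i + 1] = nxt
--     below = {}
--     for i in range(n, 0, -1):
--         below = {j: _value(s, t, n, m, i, j, below) for j in need[i]}
--     return (below[m] + sum(below[j] for j in top[1:])) % MOD * 2 % MOD
-- ===== Notes on version B (the rewrite author's own statement) =====
-- stated objective: alternative
-- what changed: A fills the entire (n+1)x(m+1) DP table bottom-up with cell-by-cell indexed assignments; B is a demand-driven (top-down memoised) evaluation: a first pass propagates from the answer's cells the per-row sets of cells actually needed, and a second pass evaluates only those demanded cells into per-row dicts keyed by column, never materialising A's table of values.
import Mathlib
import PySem

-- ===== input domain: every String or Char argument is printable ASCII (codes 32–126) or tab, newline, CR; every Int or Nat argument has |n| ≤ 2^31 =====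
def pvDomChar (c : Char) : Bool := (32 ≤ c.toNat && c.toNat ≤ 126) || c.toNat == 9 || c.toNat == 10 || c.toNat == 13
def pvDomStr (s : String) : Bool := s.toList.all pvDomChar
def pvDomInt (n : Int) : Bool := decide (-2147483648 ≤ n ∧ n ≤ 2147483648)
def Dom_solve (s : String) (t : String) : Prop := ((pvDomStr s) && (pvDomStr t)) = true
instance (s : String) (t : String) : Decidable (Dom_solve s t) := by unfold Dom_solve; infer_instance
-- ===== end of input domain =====

-- B replaces A's exhaustive bottom-up (n+1)×(m+1) table fill with a demand-driven (top-down
-- memoised) evaluation: a dependency pass discovers which cells the answer actually reads,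
-- then only those cells are evaluated into per-row dicts; A's full table is never built.

-- ===== PORT A =====
def MOD : Int := 998244353
-- s[i]; every index the programs use is in range, where pyGetD is exact
def pvChr (s : String) (i : Int) : Char := PySem.List.pyGetD s.toList i ' '
-- dp[i][j] read / write; every index used is in range, where pyGetD/pySetD are exact
def pvGet2 (dp : List (List Int)) (i j : Int) : Int :=
  PySem.List.pyGetD (PySem.List.pyGetD dp i []) j 0
def pvSet2 (dp : List (List Int)) (i j : Int) (v : Int) : List (List Int) :=
  PySem.List.pySetD dp i (PySem.List.pySetD (PySem.List.pyGetD dp i []) j v)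

-- the body of A's inner `for j in range(m+1)` loop
def innerStep (s t : String) (n m i : Int) (dp : List (List Int)) (j : Int) : List (List Int) :=
  if j = 0 then
    if i ≥ m then pvSet2 dp i 0 (n - i + 1)
    else if pvChr s i = pvChr t i then pvSet2 dp i 0 (pvGet2 dp (i+1) 0)
    else dp
  else if j = m then
    let dp1 := pvSet2 dp i m (PySem.Int.mod (2 * pvGet2 dp (i+1) m) MOD)
    if pvChr s i = pvChr t (m-1) then
      pvSet2 dp1 i m (PySem.Int.mod (pvGet2 dp1 i m + pvGet2 dp1 (i+1) (m-1)) MOD)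
    else dp1
  else
    let dp1 := if i + j ≥ m ∨ pvChr s i = pvChr t (i+j) then pvSet2 dp i j (pvGet2 dp (i+1) j) else dp
    if pvChr s i = pvChr t (j-1) then
      pvSet2 dp1 i j (PySem.Int.mod (pvGet2 dp1 i j + pvGet2 dp1 (i+1) (j-1)) MOD)
    else dp1

def solveInner (s t : String) (n m : Int) (dp : List (List Int)) (i : Int) : List (List Int) :=
  (PySem.List.pyRange 0 (m+1) 1).foldl (innerStep s t n m i) dp

def solve (s : String) (t : String) : Int :=
  let n : Int := PySem.Str.len s
  let m : Int := PySem.Str.len t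
  let dp : List (List Int) :=
    (PySem.List.pyRange 0 (n+1) 1).map (fun _ => (PySem.List.pyRange 0 (m+1) 1).map (fun _ => (0:Int)))
  let dp := pvSet2 dp n 0 1
  let dp := (PySem.List.pyRange (n-1) 0 (-1)).foldl (solveInner s t n m) dp
  let ans := pvGet2 dp 1 m
  let ans := (PySem.List.pyRange 0 m 1).foldl
    (fun ans i => if pvChr t i = pvChr s 0 then PySem.Int.mod (ans + pvGet2 dp 1 i) MOD else ans) ans
  PySem.Int.mod (ans * 2) MOD

-- ===== PORT B =====
-- columns of row i+1 that the cell (i, j) actually reads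
def depsB (s t : String) (n m i j : Int) : List Int :=
  if j = 0 then (if i < m ∧ pvChr s i = pvChr t i then [0] else [])
  else if j = m then (if pvChr s i = pvChr t (m-1) then [m, m-1] else [m])
  else
    let out : List Int := if i + j ≥ m ∨ pvChr s i = pvChr t (i+j) then [j] else []
    if pvChr s i = pvChr t (j-1) then out ++ [j-1] else out

-- below[j]; every key the program reads is present, where getD is exact
def pvDGet (below : PySem.Dict Int Int) (j : Int) : Int := PySem.Dict.getD below j 0

-- value of cell (i, j), reading the demanded cells of row i+1 from `below`
def valueB (s t : String) (n m i j : Int) (below : PySem.Dict Int Int) : Int :=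
  if i = n then (if j = 0 then 1 else 0)
  else if j = 0 then
    (if i ≥ m then n - i + 1 else if pvChr s i = pvChr t i then pvDGet below 0 else 0)
  else if j = m then
    let v := PySem.Int.mod (2 * pvDGet below m) MOD
    if pvChr s i = pvChr t (m-1) then PySem.Int.mod (v + pvDGet below (m-1)) MOD else v
  else
    let v := if i + j ≥ m ∨ pvChr s i = pvChr t (i+j) then pvDGet below j else 0
    if pvChr s i = pvChr t (j-1) then PySem.Int.mod (v + pvDGet below (j-1)) MOD else v

def solve_alt (s : String) (t : String) : Int :=
  let n : Int := PySem.Str.len s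
  let m : Int := PySem.Str.len t
  let top : List Int :=
    [m] ++ (PySem.List.pyRange 0 m 1).filter (fun j => decide (pvChr t j = pvChr s 0))
  let need : List (PySem.Set Int) :=
    (PySem.List.pyRange 0 (n+1) 1).map (fun _ => (PySem.Set.empty : PySem.Set Int))
  let need := PySem.List.pySetD need 1 (PySem.Set.ofList top)
  let need := (PySem.List.pyRange 1 n 1).foldl (fun need i =>
      let nxt := (PySem.List.pyGetD need i (PySem.Set.empty : PySem.Set Int)).foldl
        (fun nxt j => PySem.Set.update nxt (depsB s t n m i j)) (PySem.Set.empty : PySem.Set Int)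
      PySem.List.pySetD need (i+1) nxt) need
  let below : PySem.Dict Int Int := PySem.Dict.empty
  let below := (PySem.List.pyRange n 0 (-1)).foldl (fun below i =>
      (PySem.List.pyGetD need i (PySem.Set.empty : PySem.Set Int)).foldl
        (fun d j => PySem.Dict.insert d j (valueB s t n m i j below)) PySem.Dict.empty) below
  PySem.Int.mod (PySem.Int.mod (pvDGet below m + ((top.drop 1).map (fun j => pvDGet below j)).sum) MOD * 2) MOD

-- ===== PRECONDITION & SPEC =====
-- Pre_ excludes only s = "", where A raises IndexError (dp[1] and s[0] on the empty string).
def Pre_solve (s : String) (t : String) : Prop := s ≠ ""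
instance (s : String) (t : String) : Decidable (Pre_solve s t) := by unfold Pre_solve; infer_instance
def pvWitness_solve : String × String := ("ab", "a")

def Spec_solve (s : String) (t : String) (out : Int) : Prop := out = solve_alt s t
instance (s : String) (t : String) (out : Int) : Decidable (Spec_solve s t out) := by
  unfold Spec_solve; infer_instance

-- ===== CLAIM (what is proved, stated in full; the proofs are below) =====
def Claim_equal_solve : Prop := ∀ (s : String) (t : String),
  Dom_solve s t → Pre_solve s t → Spec_solve s t (solve s t)

-- ===== LEMMAS AND PROOFS =====

-- proof-layer reference row recurrence (the rows of A's table, equivalently B's cell values)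
def pvRowGet (row : List Int) (j : Int) : Int := PySem.List.pyGetD row j 0

def cellB (row : List Int) (s t : String) (i j m : Int) : Int :=
  let v := if i + j ≥ m ∨ pvChr s i = pvChr t (i+j) then pvRowGet row j else 0
  if pvChr s i = pvChr t (j-1) then PySem.Int.mod (v + pvRowGet row (j-1)) MOD else v

def stepB (s t : String) (n m : Int) (row : List Int) (i : Int) : List Int :=
  let c0 := if i ≥ m then n - i + 1 else if pvChr s i = pvChr t i then pvRowGet row 0 else 0
  if m = 0 then [c0]
  else
    let last := PySem.Int.mod (2 * pvRowGet row m) MOD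
    let last := if pvChr s i = pvChr t (m-1) then PySem.Int.mod (last + pvRowGet row (m-1)) MOD else last
    [c0] ++ (PySem.List.pyRange 1 m 1).map (fun j => cellB row s t i j m) ++ [last]

def Frow (s t : String) (n : Int) (M : Nat) : Nat → List Int
  | 0 => 1 :: List.replicate M 0
  | (k+1) => stepB s t n (M:Int) (Frow s t n M k) (n - ((k+1:Nat):Int))


-- ---------- A-side machinery: the table fold equals the row fold of stepB ----------
theorem rowSelf (dp : List (List Int)) (A : Nat) (hA : A < dp.length) (cur : List Int) :
    PySem.List.pyGetD (PySem.List.pySetD dp (A:Int) cur) (A:Int) [] = cur := by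
  simp [List.getD_eq_getElem?_getD, hA]

theorem rowSucc (dp : List (List Int)) (A : Nat) (cur : List Int) :
    PySem.List.pyGetD (PySem.List.pySetD dp (A:Int) cur) ((A:Int)+1) [] = dp.getD (A+1) [] := by
  have : ((A:Int)+1) = ((A+1:Nat):Int) := by push_cast; ring
  rw [this]
  simp only [PySem.List.pySetD_natCast, PySem.List.pyGetD_natCast,
    List.getD_eq_getElem?_getD]
  rw [List.getElem?_set_ne (by omega)]

theorem setSet (dp : List (List Int)) (A : Nat) (cur w : List Int) :
    PySem.List.pySetD (PySem.List.pySetD dp (A:Int) cur) (A:Int) w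
      = PySem.List.pySetD dp (A:Int) w := by
  simp [List.set_set]

theorem pvSet2_state (dp : List (List Int)) (A : Nat) (hA : A < dp.length) (cur : List Int)
    (j : Int) (v : Int) :
    pvSet2 (PySem.List.pySetD dp (A:Int) cur) (A:Int) j v
      = PySem.List.pySetD dp (A:Int) (PySem.List.pySetD cur j v) := by
  unfold pvSet2
  rw [rowSelf dp A hA cur, setSet]

theorem pvGet2_succ (dp : List (List Int)) (A : Nat) (cur : List Int) (j : Int) :
    pvGet2 (PySem.List.pySetD dp (A:Int) cur) ((A:Int)+1) j
      = PySem.List.pyGetD (dp.getD (A+1) []) j 0 := by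
  unfold pvGet2; rw [rowSucc]

theorem pvGet2_self (dp : List (List Int)) (A : Nat) (hA : A < dp.length) (cur : List Int) (j : Int) :
    pvGet2 (PySem.List.pySetD dp (A:Int) cur) (A:Int) j = PySem.List.pyGetD cur j 0 := by
  unfold pvGet2; rw [rowSelf dp A hA cur]

theorem set_of_getD_zero (cur : List Int) (jl : Nat) (h : jl < cur.length) (hz : cur.getD jl 0 = 0) :
    cur.set jl 0 = cur := by
  rw [← hz, List.getD_eq_getElem _ _ h]
  exact List.set_getElem_self ..

theorem stepB_length (s t : String) (n : Int) (M : Nat) (row : List Int) (i : Int) :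
    (stepB s t n (M:Int) row i).length = M + 1 := by
  unfold stepB
  by_cases h : M = 0
  · simp [h]
  · simp [h, PySem.List.length_pyRange_one]
    omega

theorem stepB_getD_zero (s t : String) (n : Int) (M : Nat) (row : List Int) (i : Int) :
    (stepB s t n (M:Int) row i).getD 0 0
      = (if i ≥ (M:Int) then n - i + 1 else if pvChr s i = pvChr t i then pvRowGet row 0 else 0) := by
  unfold stepB
  by_cases h : M = 0 <;> simp [h]

theorem stepB_getD_mid (s t : String) (n : Int) (M : Nat) (row : List Int) (i : Int)
    (j : Nat) (h1 : 1 ≤ j) (h2 : j < M) :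
    (stepB s t n (M:Int) row i).getD j 0 = cellB row s t i (j:Int) (M:Int) := by
  unfold stepB
  have hM0 : ¬ (M = 0) := by omega
  simp only [ge_iff_le, Nat.cast_eq_zero, hM0, if_false, List.cons_append, List.nil_append]
  obtain ⟨k, rfl⟩ : ∃ k, j = k + 1 := ⟨j - 1, by omega⟩
  rw [List.getD_cons_succ]
  have hlen : k < ((PySem.List.pyRange 1 (M:Int) 1).map (fun j => cellB row s t i j (M:Int))).length := by
    simp [PySem.List.length_pyRange_one]; omega
  rw [List.getD_append _ _ _ _ hlen]
  rw [← PySem.List.pyGetD_natCast,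
      PySem.List.pyGetD_map_pyRange_one (fun j => cellB row s t i j (M:Int)) 1 (M:Int) k 0 (by omega)]
  congr 1
  push_cast; ring

theorem stepB_getD_last (s t : String) (n : Int) (M : Nat) (row : List Int) (i : Int) (hM : 0 < M) :
    (stepB s t n (M:Int) row i).getD M 0
      = (if pvChr s i = pvChr t ((M:Int)-1)
          then PySem.Int.mod (PySem.Int.mod (2 * pvRowGet row (M:Int)) MOD + pvRowGet row ((M:Int)-1)) MOD
          else PySem.Int.mod (2 * pvRowGet row (M:Int)) MOD) := by
  unfold stepB
  have hM0 : ¬ (M = 0) := by omega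
  simp only [ge_iff_le, Nat.cast_eq_zero, hM0, if_false, List.cons_append, List.nil_append]
  set z := (if pvChr s i = pvChr t ((M:Int)-1)
          then PySem.Int.mod (PySem.Int.mod (2 * pvRowGet row (M:Int)) MOD + pvRowGet row ((M:Int)-1)) MOD
          else PySem.Int.mod (2 * pvRowGet row (M:Int)) MOD) with hz
  set L := (PySem.List.pyRange 1 (M:Int) 1).map (fun j => cellB row s t i j (M:Int)) with hL
  have hlen : L.length = M - 1 := by
    simp [hL, PySem.List.length_pyRange_one]
  obtain ⟨k, hk⟩ : ∃ k, M = k + 1 := ⟨M - 1, by omega⟩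
  rw [hk, List.getD_cons_succ]
  rw [show k = L.length by omega, List.getD_append_right _ _ _ _ (le_refl _)]
  simp

theorem getD_set_self (cur : List Int) (jl : Nat) (v : Int) (h : jl < cur.length) :
    (cur.set jl v).getD jl 0 = v := by
  simp [List.getD_eq_getElem?_getD, h]

theorem innerStep_eval (s t : String) (n : Int) (M A : Nat)
    (dp : List (List Int)) (row cur : List Int) (hA1 : A + 1 < dp.length)
    (hrow : dp.getD (A+1) [] = row)
    (jl : Nat) (hjl : jl ≤ M) (hcl : cur.length = M + 1) (hz : cur.getD jl 0 = 0) :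
    innerStep s t n (M:Int) (A:Int) (PySem.List.pySetD dp (A:Int) cur) ((jl:Nat):Int)
      = PySem.List.pySetD dp (A:Int) (cur.set jl ((stepB s t n (M:Int) row (A:Int)).getD jl 0)) := by
  have hA : A < dp.length := by omega
  have hset0 : ∀ v : Int, PySem.List.pySetD cur (0:Int) v = cur.set 0 v := fun v => by
    rw [show (0:Int) = ((0:Nat):Int) from rfl, PySem.List.pySetD_natCast]
  unfold innerStep
  by_cases hj0 : jl = 0
  · subst hj0
    rw [stepB_getD_zero]
    simp only [Nat.cast_zero, ite_true, ge_iff_le]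
    by_cases hge : (M:Int) ≤ (A:Int)
    · rw [if_pos hge, if_pos hge, pvSet2_state dp A hA cur, hset0]
    · rw [if_neg hge, if_neg hge]
      by_cases hch : pvChr s (A:Int) = pvChr t (A:Int)
      · rw [if_pos hch, if_pos hch, pvSet2_state dp A hA cur, hset0,
           pvGet2_succ dp A cur, hrow]
        rfl
      · rw [if_neg hch, if_neg hch, set_of_getD_zero cur 0 (by omega) hz]
  · -- jl ≥ 1
    have hMpos : 0 < M := by omega
    have hjlne : ¬ ((jl:Int) = 0) := by exact_mod_cast hj0
    have hsetM : ∀ (w : List Int) (v : Int), PySem.List.pySetD w ((M:Nat):Int) v = w.set M v :=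
      fun w v => PySem.List.pySetD_natCast ..
    have hsetj : ∀ (w : List Int) (v : Int), PySem.List.pySetD w ((jl:Nat):Int) v = w.set jl v :=
      fun w v => PySem.List.pySetD_natCast ..
    rw [if_neg hjlne]
    by_cases hjm : jl = M
    · subst hjm
      rw [if_pos rfl, stepB_getD_last s t n jl row (A:Int) hMpos]
      rw [pvGet2_succ dp A cur, hrow]
      rw [pvSet2_state dp A hA cur, hsetM]
      by_cases hch : pvChr s (A:Int) = pvChr t ((jl:Int)-1)
      · rw [if_pos hch, if_pos hch]
        rw [pvGet2_self dp A hA, pvGet2_succ dp A, hrow]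
        rw [pvSet2_state dp A hA, hsetM, List.set_set]
        congr 2
        simp only [pvRowGet, PySem.List.pyGetD_natCast]
        rw [getD_set_self _ _ _ (by omega)]
      · rw [if_neg hch, if_neg hch]
        rfl
    · -- interior
      have hjmne : ¬ ((jl:Int) = (M:Int)) := by exact_mod_cast hjm
      rw [if_neg hjmne, stepB_getD_mid s t n M row (A:Int) jl (by omega) (by omega)]
      unfold cellB
      rw [pvGet2_succ dp A cur, hrow]
      by_cases hc1 : (A:Int) + (jl:Int) ≥ (M:Int) ∨ pvChr s (A:Int) = pvChr t ((A:Int)+(jl:Int))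
      · rw [if_pos hc1, if_pos hc1, pvSet2_state dp A hA cur, hsetj]
        by_cases hch : pvChr s (A:Int) = pvChr t ((jl:Int)-1)
        · rw [if_pos hch, if_pos hch]
          rw [pvGet2_self dp A hA, pvGet2_succ dp A, hrow]
          rw [pvSet2_state dp A hA, hsetj, List.set_set]
          congr 2
          simp only [pvRowGet, PySem.List.pyGetD_natCast]
          rw [getD_set_self _ _ _ (by omega)]
        · rw [if_neg hch, if_neg hch]
          rfl
      · rw [if_neg hc1, if_neg hc1]
        by_cases hch : pvChr s (A:Int) = pvChr t ((jl:Int)-1)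
        · rw [if_pos hch, if_pos hch]
          rw [pvGet2_self dp A hA, pvGet2_succ dp A, hrow]
          rw [pvSet2_state dp A hA, hsetj]
          congr 2
          simp only [pvRowGet, PySem.List.pyGetD_natCast, hz]
        · rw [if_neg hch, if_neg hch, set_of_getD_zero cur jl (by omega) hz]

theorem getD_set_ne (cur : List Int) (j k : Nat) (v : Int) (h : k ≠ j) :
    (cur.set j v).getD k 0 = cur.getD k 0 := by
  simp only [List.getD_eq_getElem?_getD]
  rw [List.getElem?_set_ne (Ne.symm h)]

theorem inner_loop (s t : String) (n : Int) (M A : Nat)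
    (dp : List (List Int)) (row : List Int) (hA1 : A + 1 < dp.length)
    (hrow : dp.getD (A+1) [] = row) :
    ∀ (cnt jl : Nat), jl + cnt = M + 1 →
    ∀ (cur : List Int), cur.length = M + 1 →
    (∀ k : Nat, k < jl → cur.getD k 0 = (stepB s t n (M:Int) row (A:Int)).getD k 0) →
    (∀ k : Nat, jl ≤ k → cur.getD k 0 = 0) →
    (PySem.List.pyRange ((jl:Nat):Int) ((M:Int)+1) 1).foldl (innerStep s t n (M:Int) (A:Int))
        (PySem.List.pySetD dp (A:Int) cur)
      = PySem.List.pySetD dp (A:Int) (stepB s t n (M:Int) row (A:Int)) := by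
  intro cnt
  induction cnt with
  | zero =>
    intro jl hjl cur hcl hpref _
    have hjlM : jl = M + 1 := by omega
    subst hjlM
    rw [PySem.List.pyRange_one_eq_nil (by push_cast; omega)]
    simp only [List.foldl_nil]
    congr 1
    apply List.ext_getElem (by rw [hcl, stepB_length])
    intro k h1 h2
    rw [← List.getD_eq_getElem cur 0 h1, ← List.getD_eq_getElem _ 0 h2]
    exact hpref k (by omega)
  | succ c ih =>
    intro jl hjl cur hcl hpref hsuf
    have hjlM : jl ≤ M := by omega
    rw [PySem.List.pyRange_one_cons (by exact_mod_cast by omega)]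
    rw [List.foldl_cons]
    rw [innerStep_eval s t n M A dp row cur hA1 hrow jl hjlM hcl (hsuf jl (le_refl _))]
    have hcast : ((jl:Nat):Int) + 1 = (((jl+1:Nat)):Int) := by push_cast; ring
    rw [hcast]
    apply ih (jl+1) (by omega)
    · simp [hcl]
    · intro k hk
      by_cases hkj : k = jl
      · subst hkj
        rw [getD_set_self _ _ _ (by omega)]
      · rw [getD_set_ne _ _ _ _ hkj]
        exact hpref k (by omega)
    · intro k hk
      rw [getD_set_ne _ _ _ _ (by omega)]
      exact hsuf k (by omega)

theorem getD_set_self' {α : Type} (l : List α) (j : Nat) (v d : α) (h : j < l.length) :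
    (l.set j v).getD j d = v := by
  simp [List.getD_eq_getElem?_getD, h]

theorem getD_set_ne' {α : Type} (l : List α) (j k : Nat) (v d : α) (h : k ≠ j) :
    (l.set j v).getD k d = l.getD k d := by
  simp only [List.getD_eq_getElem?_getD]
  rw [List.getElem?_set_ne (Ne.symm h)]

theorem set_getD_self' {α : Type} (l : List α) (j : Nat) (d : α) (h : j < l.length) :
    l.set j (l.getD j d) = l := by
  rw [List.getD_eq_getElem _ _ h]
  exact List.set_getElem_self ..

theorem getD_replicate_zero (nn k : Nat) : (List.replicate nn (0:Int)).getD k 0 = 0 := by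
  rcases lt_or_ge k nn with h | h
  · rw [List.getD_eq_getElem _ _ (by simp [h]), List.getElem_replicate]
  · rw [List.getD_eq_default _ _ (by simp [h])]

theorem outer_loop (s t : String) (n : Int) (M : Nat) :
    ∀ (A : Nat) (dp : List (List Int)) (row : List Int),
    A + 1 < dp.length →
    row.length = M + 1 →
    dp.getD (A+1) [] = row →
    (∀ k : Nat, 1 ≤ k → k ≤ A → dp.getD k [] = List.replicate (M+1) 0) →
    PySem.List.pyGetD ((PySem.List.pyRange ((A:Nat):Int) 0 (-1)).foldl (solveInner s t n (M:Int)) dp) 1 []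
      = (PySem.List.pyRange ((A:Nat):Int) 0 (-1)).foldl (stepB s t n (M:Int)) row := by
  intro A
  induction A with
  | zero =>
    intro dp row h1 h2 h3 h4
    rw [PySem.List.pyRange_neg_one_eq_nil (by norm_num)]
    simp only [List.foldl_nil]
    rw [show (1:Int) = ((1:Nat):Int) from rfl, PySem.List.pyGetD_natCast]
    exact h3
  | succ a ih =>
    intro dp row h1 h2 h3 h4
    rw [PySem.List.pyRange_neg_one_cons (by push_cast; omega)]
    simp only [List.foldl_cons]
    have hzero : dp.getD (a+1) [] = List.replicate (M+1) 0 := h4 (a+1) (by omega) (le_refl _)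
    have hdp : dp = PySem.List.pySetD dp ((a+1:Nat):Int) (List.replicate (M+1) 0) := by
      rw [PySem.List.pySetD_natCast, ← hzero, set_getD_self' _ _ _ (by omega)]
    have hinner : solveInner s t n (M:Int) dp ((a+1:Nat):Int)
        = PySem.List.pySetD dp ((a+1:Nat):Int) (stepB s t n (M:Int) row ((a+1:Nat):Int)) := by
      unfold solveInner
      conv_lhs => rw [hdp]
      rw [show (0:Int) = ((0:Nat):Int) from rfl]
      exact inner_loop s t n M (a+1) dp row h1 h3 (M+1) 0 (by omega)
        (List.replicate (M+1) 0) (by simp)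
        (fun k hk => absurd hk (by omega))
        (fun k _ => getD_replicate_zero (M+1) k)
    rw [hinner]
    have hc2 : ((a+1:Nat):Int) - 1 = ((a:Nat):Int) := by push_cast; ring
    rw [hc2]
    rw [ih (PySem.List.pySetD dp ((a+1:Nat):Int) (stepB s t n (M:Int) row ((a+1:Nat):Int)))
        (stepB s t n (M:Int) row ((a+1:Nat):Int))
        (by simp; omega)
        (stepB_length ..)
        (by rw [PySem.List.pySetD_natCast]; exact getD_set_self' _ _ _ _ (by omega))
        (fun k hk1 hk2 => by
          rw [PySem.List.pySetD_natCast, getD_set_ne' _ _ _ _ _ (by omega)]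
          exact h4 k hk1 (by omega))]

theorem MOD_pos : (0:Int) < MOD := by decide

theorem fold_mod_congr (P : Int → Prop) [DecidablePred P] (f : Int → Int) :
    ∀ (L : List Int) (a b : Int), PySem.Int.mod a MOD = PySem.Int.mod b MOD →
    PySem.Int.mod (L.foldl (fun ans i => if P i then PySem.Int.mod (ans + f i) MOD else ans) a) MOD
      = PySem.Int.mod (b + ((L.filter (fun i => decide (P i))).map f).sum) MOD := by
  intro L
  induction L with
  | nil => intro a b h; simpa using h
  | cons x L ih =>
    intro a b h
    rw [PySem.Int.mod_eq_emod_of_pos MOD_pos, PySem.Int.mod_eq_emod_of_pos MOD_pos] at h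
    by_cases hx : P x
    · rw [List.foldl_cons, if_pos hx, List.filter_cons_of_pos (by simp [hx]),
        List.map_cons, List.sum_cons]
      rw [ih (PySem.Int.mod (a + f x) MOD) (b + f x) (by
        rw [PySem.Int.mod_eq_emod_of_pos MOD_pos, PySem.Int.mod_eq_emod_of_pos MOD_pos,
          PySem.Int.mod_eq_emod_of_pos MOD_pos,
          Int.emod_emod_of_dvd _ dvd_rfl, Int.add_emod a, Int.add_emod b, h])]
      congr 1
      ring
    · rw [List.foldl_cons, if_neg hx, List.filter_cons_of_neg (by simp [hx])]
      exact ih a b (by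
        rw [PySem.Int.mod_eq_emod_of_pos MOD_pos, PySem.Int.mod_eq_emod_of_pos MOD_pos, h])

theorem final_eq (x y : Int) (h : PySem.Int.mod x MOD = PySem.Int.mod y MOD) :
    PySem.Int.mod (x * 2) MOD = PySem.Int.mod (PySem.Int.mod y MOD * 2) MOD := by
  rw [PySem.Int.mod_eq_emod_of_pos MOD_pos, PySem.Int.mod_eq_emod_of_pos MOD_pos] at h
  rw [PySem.Int.mod_eq_emod_of_pos MOD_pos, PySem.Int.mod_eq_emod_of_pos MOD_pos,
      PySem.Int.mod_eq_emod_of_pos MOD_pos]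
  rw [Int.mul_emod x 2, Int.mul_emod (y % MOD) 2, Int.emod_emod_of_dvd _ dvd_rfl, h]

theorem map_const_pyRange {α : Type} (K : Nat) (c : α) :
    (PySem.List.pyRange 0 ((K:Nat):Int) 1).map (fun _ => c) = List.replicate K c := by
  rw [PySem.List.pyRange_one, List.map_map]
  rw [show ((fun (_ : Int) => c) ∘ fun (k : Nat) => (0:Int) + (k:Int)) = (fun _ => c) from rfl]
  rw [List.map_const', List.length_range]
  norm_num

theorem hlen_str (s : String) : PySem.Str.len s = ((s.toList.length : Nat) : Int) := by
  simp

-- ---------- the row fold equals Frow ----------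
theorem fold_stepB_eq_Frow (s t : String) (N M : Nat) :
    ∀ (a : Nat), a < N →
    (PySem.List.pyRange ((a:Nat):Int) 0 (-1)).foldl (stepB s t (N:Int) (M:Int))
        (Frow s t (N:Int) M (N-1-a))
      = Frow s t (N:Int) M (N-1) := by
  intro a
  induction a with
  | zero =>
    intro _
    rw [PySem.List.pyRange_neg_one_eq_nil (by norm_num)]
    simp
  | succ a ih =>
    intro ha
    rw [PySem.List.pyRange_neg_one_cons (by push_cast; omega), List.foldl_cons]
    have hstep : stepB s t (N:Int) (M:Int) (Frow s t (N:Int) M (N-1-(a+1))) ((a+1:Nat):Int)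
        = Frow s t (N:Int) M (N-1-a) := by
      have h1 : N-1-a = (N-2-a)+1 := by omega
      rw [h1, show Frow s t (N:Int) M ((N-2-a)+1)
          = stepB s t (N:Int) (M:Int) (Frow s t (N:Int) M (N-2-a)) ((N:Int) - ((N-2-a+1:Nat):Int)) from rfl]
      congr 2
      · omega
      · omega
    rw [hstep, show ((a+1:Nat):Int) - 1 = ((a:Nat):Int) by push_cast; ring]
    exact ih (by omega)

-- ---------- B-side: the demanded-set recursion and its properties ----------
def nxtOf (s t : String) (n m i : Int) (st : PySem.Set Int) : PySem.Set Int :=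
  st.foldl (fun nxt j => PySem.Set.update nxt (depsB s t n m i j)) (PySem.Set.empty : PySem.Set Int)

def needRec (s t : String) (n m : Int) (top : List Int) : Nat → PySem.Set Int
  | 0 => (PySem.Set.empty : PySem.Set Int)
  | 1 => PySem.Set.ofList top
  | (k+2) => nxtOf s t n m ((k+1:Nat):Int) (needRec s t n m top (k+1))

theorem mem_foldl_update {f : Int → List Int} :
    ∀ (L : List Int) (acc : PySem.Set Int) (y : Int),
    y ∈ L.foldl (fun acc j => PySem.Set.update acc (f j)) acc ↔ y ∈ acc ∨ ∃ j ∈ L, y ∈ f j := by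
  intro L
  induction L with
  | nil => simp
  | cons x L ih =>
    intro acc y
    rw [List.foldl_cons, ih, PySem.Set.mem_update]
    constructor
    · rintro ((h | h) | ⟨j, hj, hy⟩)
      · exact Or.inl h
      · exact Or.inr ⟨x, by simp, h⟩
      · exact Or.inr ⟨j, by simp [hj], hy⟩
    · rintro (h | ⟨j, hj, hy⟩)
      · exact Or.inl (Or.inl h)
      · rcases List.mem_cons.mp hj with rfl | hj
        · exact Or.inl (Or.inr hy)
        · exact Or.inr ⟨j, hj, hy⟩

theorem mem_nxtOf (s t : String) (n m i : Int) (st : PySem.Set Int) (y : Int) :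
    y ∈ nxtOf s t n m i st ↔ ∃ j ∈ st, y ∈ depsB s t n m i j := by
  unfold nxtOf
  rw [mem_foldl_update]
  simp [PySem.Set.empty]

theorem depsB_bounds (s t : String) (n m i j y : Int) (h0 : 0 ≤ j) (hm : j ≤ m)
    (hy : y ∈ depsB s t n m i j) : 0 ≤ y ∧ y ≤ m := by
  unfold depsB at hy
  split_ifs at hy with h1 h2 h3 h4 h5 <;>
    simp_all <;> omega

theorem needRec_bounds (s t : String) (n m : Int) (top : List Int)
    (htop : ∀ y ∈ top, 0 ≤ y ∧ y ≤ m) :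
    ∀ (k : Nat), ∀ y ∈ needRec s t n m top k, 0 ≤ y ∧ y ≤ m := by
  intro k
  induction k with
  | zero => intro y hy; simp [needRec, PySem.Set.empty] at hy
  | succ k ih =>
    match k, ih with
    | 0, _ =>
      intro y hy
      exact htop y (by simpa [needRec, PySem.Set.mem_ofList] using hy)
    | (k+1), ih =>
      intro y hy
      rw [show k+1+1 = k+2 from rfl] at hy
      unfold needRec at hy
      rcases (mem_nxtOf ..).mp hy with ⟨j, hj, hyd⟩
      obtain ⟨hj0, hjm⟩ := ih j hj
      exact depsB_bounds s t n m _ j y hj0 hjm hyd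

-- ---------- pass 1: the need list holds needRec ----------
theorem pass1 (s t : String) (N : Nat) (m : Int) (top : List Int) :
    ∀ (cnt a : Nat), 1 ≤ a → a + cnt = N →
    ∀ (L : List (PySem.Set Int)), L.length = N + 1 →
    (∀ k : Nat, k ≤ a → L.getD k (PySem.Set.empty : PySem.Set Int) = needRec s t (N:Int) m top k) →
    ∀ k : Nat, k ≤ N →
    ((PySem.List.pyRange ((a:Nat):Int) ((N:Nat):Int) 1).foldl (fun need i =>
        PySem.List.pySetD need (i+1)
          ((PySem.List.pyGetD need i (PySem.Set.empty : PySem.Set Int)).foldl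
            (fun nxt j => PySem.Set.update nxt (depsB s t (N:Int) m i j))
            (PySem.Set.empty : PySem.Set Int))) L).getD k (PySem.Set.empty : PySem.Set Int)
      = needRec s t (N:Int) m top k := by
  intro cnt
  induction cnt with
  | zero =>
    intro a ha1 haN L hL hinv k hk
    rw [PySem.List.pyRange_one_eq_nil (by omega)]
    exact hinv k (by omega)
  | succ c ih =>
    intro a ha1 haN L hL hinv k hk
    rw [PySem.List.pyRange_one_cons (by omega), List.foldl_cons]
    have hget : PySem.List.pyGetD L ((a:Nat):Int) (PySem.Set.empty : PySem.Set Int)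
        = needRec s t (N:Int) m top a := by
      rw [PySem.List.pyGetD_natCast]; exact hinv a (le_refl _)
    have hnxt : needRec s t (N:Int) m top (a+1)
        = nxtOf s t (N:Int) m ((a:Nat):Int) (needRec s t (N:Int) m top a) := by
      obtain ⟨b, rfl⟩ : ∃ b, a = b + 1 := ⟨a - 1, by omega⟩
      rfl
    simp only [hget]
    rw [show (List.foldl (fun nxt j => PySem.Set.update nxt (depsB s t (N:Int) m ((a:Nat):Int) j))
          (PySem.Set.empty : PySem.Set Int) (needRec s t (N:Int) m top a))
        = nxtOf s t (N:Int) m ((a:Nat):Int) (needRec s t (N:Int) m top a) from rfl]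
    rw [← hnxt]
    rw [show ((a:Nat):Int) + 1 = ((a+1:Nat):Int) by push_cast; ring]
    rw [PySem.List.pySetD_natCast]
    exact ih (a+1) (by omega) (by omega) _ (by simp [hL])
      (fun k hk' => by
        by_cases hke : k = a + 1
        · subst hke; exact getD_set_self' _ _ _ _ (by omega)
        · rw [getD_set_ne' _ _ _ _ _ hke]; exact hinv k (by omega)) k hk

-- ---------- pass 2 helpers ----------
theorem getD_insertFold_notmem (f : Int → Int) :
    ∀ (L : List Int) (d : PySem.Dict Int Int) (j : Int), j ∉ L →
    PySem.Dict.getD (L.foldl (fun d x => PySem.Dict.insert d x (f x)) d) j 0 = PySem.Dict.getD d j 0 := by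
  intro L
  induction L with
  | nil => intro d j _; rfl
  | cons x L ih =>
    intro d j hj
    rw [List.foldl_cons, ih _ _ (by simp at hj; exact hj.2),
      PySem.Dict.getD_insert]
    rw [if_neg (by simp at hj; exact hj.1)]

theorem getD_insertFold (f : Int → Int) :
    ∀ (L : List Int) (d : PySem.Dict Int Int) (j : Int), j ∈ L →
    PySem.Dict.getD (L.foldl (fun d x => PySem.Dict.insert d x (f x)) d) j 0 = f j := by
  intro L
  induction L with
  | nil => intro d j hj; simp at hj
  | cons x L ih =>
    intro d j hj
    by_cases hjL : j ∈ L
    · rw [List.foldl_cons]; exact ih _ _ hjL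
    · have hjx : j = x := by rcases List.mem_cons.mp hj with h | h; exact h; exact absurd h hjL
      subst hjx
      rw [List.foldl_cons, getD_insertFold_notmem f L _ j hjL, PySem.Dict.getD_insert, if_pos rfl]

-- ---------- valueB computes the reference cells ----------
theorem valueB_correct (s t : String) (N M : Nat) (I : Nat) (h1 : 1 ≤ I) (h2 : I ≤ N)
    (j : Int) (hj0 : 0 ≤ j) (hjm : j ≤ (M:Int)) (below : PySem.Dict Int Int)
    (hdep : I < N → ∀ j' ∈ depsB s t (N:Int) (M:Int) (I:Int) j,
        pvDGet below j' = PySem.List.pyGetD (Frow s t (N:Int) M (N-I-1)) j' 0) :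
    valueB s t (N:Int) (M:Int) (I:Int) j below
      = PySem.List.pyGetD (Frow s t (N:Int) M (N-I)) j 0 := by
  lift j to Nat using hj0 with jl
  have hjm' : jl ≤ M := by exact_mod_cast hjm
  by_cases hIN : I = N
  · subst hIN
    unfold valueB
    rw [if_pos rfl, show I - I = 0 from Nat.sub_self I]
    rw [show Frow s t ((I:Nat):Int) M 0 = 1 :: List.replicate M 0 from rfl]
    rw [PySem.List.pyGetD_natCast]
    cases jl with
    | zero => simp
    | succ p =>
      rw [List.getD_cons_succ, getD_replicate_zero]
      rw [if_neg (by exact_mod_cast Nat.succ_ne_zero p)]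
  · have hlt : I < N := by omega
    specialize hdep hlt
    have hne : ((I:Nat):Int) ≠ ((N:Nat):Int) := by exact_mod_cast hIN
    have hF : Frow s t (N:Int) M (N-I)
        = stepB s t (N:Int) (M:Int) (Frow s t (N:Int) M (N-I-1)) ((I:Nat):Int) := by
      rw [show N - I = (N-I-1) + 1 from by omega]
      rw [show Frow s t (N:Int) M ((N-I-1)+1)
          = stepB s t (N:Int) (M:Int) (Frow s t (N:Int) M (N-I-1)) ((N:Int) - ((N-I-1+1:Nat):Int)) from rfl]
      congr 1
      omega
    rw [hF, PySem.List.pyGetD_natCast]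
    unfold valueB
    rw [if_neg hne]
    set row := Frow s t (N:Int) M (N-I-1) with hrowdef
    by_cases hj0' : jl = 0
    · subst hj0'
      simp only [Nat.cast_zero] at hdep ⊢
      rw [stepB_getD_zero]
      rw [if_pos trivial]
      simp only [pvRowGet]
      by_cases hge : ((I:Nat):Int) ≥ (M:Int)
      · rw [if_pos hge, if_pos hge]
      · rw [if_neg hge, if_neg hge]
        by_cases hch : pvChr s ((I:Nat):Int) = pvChr t ((I:Nat):Int)
        · rw [if_pos hch, if_pos hch]
          apply hdep
          unfold depsB
          rw [if_pos (show (0:Int) = 0 from rfl), if_pos ⟨by omega, hch⟩]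
          simp
        · rw [if_neg hch, if_neg hch]
    · have hjne : ¬ ((jl:Nat):Int) = 0 := by exact_mod_cast hj0'
      by_cases hjM : jl = M
      · subst hjM
        have hMpos : 0 < jl := by omega
        rw [stepB_getD_last _ _ _ _ _ _ hMpos]
        rw [if_neg hjne, if_pos rfl]
        have hmm : ((jl:Nat):Int) ∈ depsB s t (N:Int) ((jl:Nat):Int) ((I:Nat):Int) ((jl:Nat):Int) := by
          unfold depsB
          rw [if_neg hjne, if_pos rfl]
          split_ifs <;> simp
        by_cases hch : pvChr s ((I:Nat):Int) = pvChr t (((jl:Nat):Int)-1)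
        · have hm1 : ((jl:Nat):Int) - 1 ∈ depsB s t (N:Int) ((jl:Nat):Int) ((I:Nat):Int) ((jl:Nat):Int) := by
            unfold depsB
            rw [if_neg hjne, if_pos rfl, if_pos hch]
            simp
          rw [if_pos hch, if_pos hch]
          simp only [pvRowGet]
          rw [hdep _ hmm, hdep _ hm1]
        · rw [if_neg hch, if_neg hch]
          simp only [pvRowGet]
          rw [hdep _ hmm]
      · have hjMne : ¬ ((jl:Nat):Int) = (M:Int) := by exact_mod_cast hjM
        rw [stepB_getD_mid _ _ _ _ _ _ jl (by omega) (by omega)]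
        unfold cellB
        rw [if_neg hjne, if_neg hjMne]
        simp only [pvRowGet]
        by_cases hc1 : ((I:Nat):Int) + ((jl:Nat):Int) ≥ (M:Int)
            ∨ pvChr s ((I:Nat):Int) = pvChr t (((I:Nat):Int)+((jl:Nat):Int))
        · have hjmem : ((jl:Nat):Int) ∈ depsB s t (N:Int) (M:Int) ((I:Nat):Int) ((jl:Nat):Int) := by
            unfold depsB
            rw [if_neg hjne, if_neg hjMne, if_pos hc1]
            split_ifs <;> simp
          rw [if_pos hc1, if_pos hc1]
          by_cases hch : pvChr s ((I:Nat):Int) = pvChr t (((jl:Nat):Int)-1)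
          · have hm1 : ((jl:Nat):Int) - 1 ∈ depsB s t (N:Int) (M:Int) ((I:Nat):Int) ((jl:Nat):Int) := by
              unfold depsB
              rw [if_neg hjne, if_neg hjMne, if_pos hc1, if_pos hch]
              simp
            rw [if_pos hch, if_pos hch, hdep _ hjmem, hdep _ hm1]
          · rw [if_neg hch, if_neg hch, hdep _ hjmem]
        · rw [if_neg hc1, if_neg hc1]
          by_cases hch : pvChr s ((I:Nat):Int) = pvChr t (((jl:Nat):Int)-1)
          · have hm1 : ((jl:Nat):Int) - 1 ∈ depsB s t (N:Int) (M:Int) ((I:Nat):Int) ((jl:Nat):Int) := by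
              unfold depsB
              rw [if_neg hjne, if_neg hjMne, if_neg hc1, if_pos hch]
              simp
            rw [if_pos hch, if_pos hch, hdep _ hm1]
          · rw [if_neg hch, if_neg hch]

-- ---------- pass 2: the row dicts hold the reference cells ----------
theorem pass2 (s t : String) (N M : Nat) (top : List Int) (hN : 1 ≤ N)
    (htop : ∀ y ∈ top, 0 ≤ y ∧ y ≤ (M:Int))
    (NL : List (PySem.Set Int))
    (hNL : ∀ k : Nat, k ≤ N → NL.getD k (PySem.Set.empty : PySem.Set Int)
        = needRec s t (N:Int) (M:Int) top k) :
    ∀ (a : Nat), 1 ≤ a → a ≤ N → ∀ below : PySem.Dict Int Int,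
    (a < N → ∀ j ∈ needRec s t (N:Int) (M:Int) top (a+1),
        pvDGet below j = PySem.List.pyGetD (Frow s t (N:Int) M (N-(a+1))) j 0) →
    ∀ j ∈ needRec s t (N:Int) (M:Int) top 1,
    pvDGet ((PySem.List.pyRange ((a:Nat):Int) 0 (-1)).foldl (fun below i =>
        (PySem.List.pyGetD NL i (PySem.Set.empty : PySem.Set Int)).foldl
          (fun d j => PySem.Dict.insert d j (valueB s t (N:Int) (M:Int) i j below)) PySem.Dict.empty) below) j
      = PySem.List.pyGetD (Frow s t (N:Int) M (N-1)) j 0 := by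
  intro a
  induction a with
  | zero => intro h; omega
  | succ a ih =>
    intro _ h2 below hbel j hjmem
    rw [PySem.List.pyRange_neg_one_cons (by push_cast; omega), List.foldl_cons]
    have hset : PySem.List.pyGetD NL ((a+1:Nat):Int) (PySem.Set.empty : PySem.Set Int)
        = needRec s t (N:Int) (M:Int) top (a+1) := by
      rw [PySem.List.pyGetD_natCast]; exact hNL (a+1) (by omega)
    have hbel' : ∀ j' ∈ needRec s t (N:Int) (M:Int) top (a+1),
        pvDGet ((PySem.List.pyGetD NL ((a+1:Nat):Int) (PySem.Set.empty : PySem.Set Int)).foldl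
          (fun d x => PySem.Dict.insert d x (valueB s t (N:Int) (M:Int) ((a+1:Nat):Int) x below))
          PySem.Dict.empty) j'
        = PySem.List.pyGetD (Frow s t (N:Int) M (N-(a+1))) j' 0 := by
      intro j' hj'
      rw [hset]
      unfold pvDGet
      rw [getD_insertFold (fun x => valueB s t (N:Int) (M:Int) ((a+1:Nat):Int) x below) _ _ _ hj']
      obtain ⟨hj0', hjm'⟩ := needRec_bounds s t (N:Int) (M:Int) top htop (a+1) j' hj'
      exact valueB_correct s t N M (a+1) (by omega) (by omega) j' hj0' hjm' below
        (fun hlt j'' hj'' => by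
          rw [show N-(a+1)-1 = N-(a+1+1) from by omega]
          apply hbel hlt
          rw [show a+1+1 = a+2 from rfl]
          unfold needRec
          rw [mem_nxtOf]
          exact ⟨j', hj', hj''⟩)
    rcases Nat.eq_zero_or_pos a with rfl | hapos
    · rw [show ((0+1:Nat):Int) - 1 = (0:Int) by norm_num,
        PySem.List.pyRange_neg_one_eq_nil (by norm_num)]
      simp only [List.foldl_nil]
      exact hbel' j hjmem
    · rw [show ((a+1:Nat):Int) - 1 = ((a:Nat):Int) by push_cast; ring]
      exact ih (by omega) (by omega) _ (fun _ => hbel') j hjmem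

theorem mem_pyRange_bounds (b y : Int) (hy : y ∈ PySem.List.pyRange 0 b 1) : 0 ≤ y ∧ y < b := by
  rw [PySem.List.pyRange_one] at hy
  obtain ⟨k, hk, rfl⟩ := List.mem_map.mp hy
  rw [List.mem_range] at hk
  constructor
  · omega
  · have : (k:Int) < (b - 0).toNat := by exact_mod_cast hk
    omega

theorem solve_eq (s t : String) (hs : s ≠ "") : solve s t = solve_alt s t := by
  have hN0 : s.toList.length ≠ 0 := by
    intro h
    exact hs (by rwa [List.length_eq_zero_iff, String.toList_eq_nil_iff] at h)
  obtain ⟨N1, hN1⟩ : ∃ k, s.toList.length = k + 1 := ⟨s.toList.length - 1, by omega⟩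
  unfold solve solve_alt
  simp only [hlen_str]
  set N := s.toList.length with hNdef
  set M := t.toList.length with hMdef
  set top : List Int :=
    [(M:Int)] ++ (PySem.List.pyRange 0 (M:Int) 1).filter (fun j => decide (pvChr t j = pvChr s 0))
    with htopdef
  have htop : ∀ y ∈ top, 0 ≤ y ∧ y ≤ (M:Int) := by
    intro y hy
    rw [htopdef] at hy
    rcases List.mem_append.mp hy with h | h
    · rw [List.mem_singleton] at h
      subst h
      constructor <;> omega
    · obtain ⟨h1, h2⟩ := mem_pyRange_bounds (M:Int) y (List.mem_of_mem_filter h)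
      constructor <;> omega
  -- A side: initial table and row (as in the table/rows correspondence)
  rw [show ((N:Int))+1 = (((N+1:Nat)):Int) by push_cast; ring,
      show ((M:Int))+1 = (((M+1:Nat)):Int) by push_cast; ring,
      map_const_pyRange (N+1) _, map_const_pyRange (M+1) (0:Int),
      map_const_pyRange (N+1) (PySem.Set.empty : PySem.Set Int)]
  have hdp1 : pvSet2 (List.replicate (N+1) (List.replicate (M+1) (0:Int))) (N:Int) 0 1
      = PySem.List.pySetD (List.replicate (N+1) (List.replicate (M+1) (0:Int))) (N:Int)
          ((1:Int) :: List.replicate M 0) := by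
    unfold pvSet2
    congr 1
    rw [PySem.List.pyGetD_natCast]
    rw [List.getD_eq_getElem _ _ (by simp), List.getElem_replicate]
    rw [show (0:Int) = ((0:Nat):Int) from rfl, PySem.List.pySetD_natCast]
    rw [List.replicate_succ, List.set_cons_zero]
  rw [hdp1]
  rw [show ((N:Int))-1 = ((N1:Nat):Int) by omega]
  have hout := outer_loop s t (N:Int) M N1
    (PySem.List.pySetD (List.replicate (N+1) (List.replicate (M+1) (0:Int))) (N:Int)
      ((1:Int) :: List.replicate M 0))
    ((1:Int) :: List.replicate M 0)
    (by simp; omega)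
    (by simp)
    (by rw [PySem.List.pySetD_natCast, show N1 + 1 = N from by omega]
        exact getD_set_self' _ _ _ _ (by simp))
    (fun k hk1 hk2 => by
      rw [PySem.List.pySetD_natCast, getD_set_ne' _ _ _ _ _ (by omega)]
      rw [List.getD_eq_getElem _ _ (by simp; omega), List.getElem_replicate])
  have hfold : (PySem.List.pyRange ((N1:Nat):Int) 0 (-1)).foldl (stepB s t (N:Int) (M:Int))
      ((1:Int) :: List.replicate M 0) = Frow s t (N:Int) M (N-1) := by
    rw [show ((1:Int) :: List.replicate M 0) = Frow s t (N:Int) M (N-1-N1) from by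
      rw [show N-1-N1 = 0 from by omega]; rfl]
    exact fold_stepB_eq_Frow s t N M N1 (by omega)
  have hNL := pass1 s t N (M:Int) top (N-1) 1 (le_refl _) (by omega)
    (PySem.List.pySetD (List.replicate (N+1) (PySem.Set.empty : PySem.Set Int)) 1
      (PySem.Set.ofList top))
    (by rw [show (1:Int) = ((1:Nat):Int) from rfl, PySem.List.pySetD_natCast]; simp)
    (fun k hk => by
      rw [show (1:Int) = ((1:Nat):Int) from rfl, PySem.List.pySetD_natCast]
      match k, hk with
      | 0, _ =>
        rw [getD_set_ne' _ _ _ _ _ (by omega)]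
        rw [List.getD_eq_getElem _ _ (by simp), List.getElem_replicate]
        rfl
      | 1, _ =>
        rw [getD_set_self' _ _ _ _ (by simp only [List.length_replicate]; omega)]
        rfl)
  -- B side: the final row dict holds the reference row
  have hbelow := pass2 s t N M top (by omega) htop _
    (fun k hk => hNL k hk) N (by omega) (le_refl _) PySem.Dict.empty
    (fun h => absurd h (lt_irrefl _))
  simp only [Nat.cast_one] at hbelow
  have hmemM : (M:Int) ∈ needRec s t (N:Int) (M:Int) top 1 := by
    rw [show needRec s t (N:Int) (M:Int) top 1 = PySem.Set.ofList top from rfl,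
      PySem.Set.mem_ofList, htopdef]
    exact List.mem_append_left _ (List.mem_singleton.mpr rfl)
  -- assemble
  simp only [pvGet2, hout, hfold]
  apply final_eq
  rw [fold_mod_congr (fun i => pvChr t i = pvChr s 0)
    (fun i => PySem.List.pyGetD (Frow s t (N:Int) M (N-1)) i 0)
    (PySem.List.pyRange 0 (M:Int) 1) _ _ rfl]
  congr 1
  rw [hbelow _ hmemM]
  congr 1
  rw [show top.drop 1
      = (PySem.List.pyRange 0 (M:Int) 1).filter (fun j => decide (pvChr t j = pvChr s 0)) from by
    rw [htopdef]; rfl]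
  refine congrArg List.sum (List.map_congr_left ?_)
  intro x hx
  refine (hbelow x ?_).symm
  rw [show needRec s t (N:Int) (M:Int) top 1 = PySem.Set.ofList top from rfl,
    PySem.Set.mem_ofList, htopdef]
  exact List.mem_append_right _ hx

-- ===== VERDICT (by name: the statement is the Claim_ definition above) =====
theorem solve_spec : Claim_equal_solve := by
  intro s t _ hpre
  unfold Spec_solve
  unfold Pre_solve at hpre
  exact solve_eq s t hpre
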